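-- pv_equiv track=rewrite | github.com/unicef-drp/sdmx-mcp | scripts/sdmx_eval_runner.py | _infer_value_column
-- ===== SOURCE A (Python) =====
-- from typing import Any
--
-- def _infer_value_column(rows: list[dict[str, Any]], hint: str | None = None) -> str | None:
--     if not rows:
--         return None
--     candidate_keys = list(rows[0].keys())
--     if hint:
--         for key in candidate_keys:
--             if key == hint:
--                 return key
--         for key in candidate_keys:
--             if hint.upper() in key.upper():
--                 return key
--     for preferred in ("OBS_VALUE", "OBS_VALUE:Observation Value"):
--         for key in candidate_keys:
--             if key == preferred:
--                 return key
--     for key in candidate_keys: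
--         if "OBS_VALUE" in key.upper():
--             return key
--     return None
-- ===== SOURCE B (Python) =====
-- def _infer_value_column(rows, hint=None):
--     if not rows:
--         return None
--     best = None  # (tier, key); earlier index wins ties via strict '<'
--     for key in rows[0].keys():
--         ku = key.upper()
--         if hint and key == hint:
--             tier = 0
--         elif hint and hint.upper() in ku:
--             tier = 1
--         elif key == "OBS_VALUE":
--             tier = 2
--         elif key == "OBS_VALUE:Observation Value":
--             tier = 3
--         elif "OBS_VALUE" in ku:
--             tier = 4
--         else:
--             continue
--         if best is None or tier < best[0]:
--             best = (tier, key)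
--     return best[1] if best else None
-- ===== Notes on version B (the rewrite author's own statement) =====
-- stated objective: alternative
-- what changed: Replaces A's five sequential full scans of the key list by a single pass that assigns each key a priority tier and keeps the best (lowest-tier, earliest) candidate.
import Mathlib
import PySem

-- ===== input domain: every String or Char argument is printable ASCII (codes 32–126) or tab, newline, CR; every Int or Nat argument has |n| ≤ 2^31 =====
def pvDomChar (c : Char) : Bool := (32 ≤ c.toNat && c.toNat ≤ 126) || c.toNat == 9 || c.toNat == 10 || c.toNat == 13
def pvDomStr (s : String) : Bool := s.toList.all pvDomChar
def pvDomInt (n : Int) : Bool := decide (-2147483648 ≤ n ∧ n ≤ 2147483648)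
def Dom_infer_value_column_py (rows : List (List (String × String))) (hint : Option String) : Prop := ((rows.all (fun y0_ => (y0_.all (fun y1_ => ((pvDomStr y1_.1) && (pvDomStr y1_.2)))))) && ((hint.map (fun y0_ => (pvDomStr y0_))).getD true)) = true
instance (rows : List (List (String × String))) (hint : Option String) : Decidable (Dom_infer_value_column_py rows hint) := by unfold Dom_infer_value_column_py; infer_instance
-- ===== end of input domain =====

-- B replaces A's five sequential full scans of the key list by one pass keeping the best (tier, earliest) candidate; alternative decomposition, same result.

-- ===== PORT A =====
def infer_value_column_py (rows : List (List (String × String))) (hint : Option String) : Option String :=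
  match rows with
  | [] => none
  | r :: _ =>
    let candidate_keys := (PySem.Dict.ofList r).keys
    let hres : Option String :=
      match hint with
      | none => none
      | some h =>
        if h == "" then none
        else
          match candidate_keys.find? (fun key => key == h) with
          | some key => some key
          | none => candidate_keys.find? (fun key => PySem.Str.isIn (PySem.Str.upper h) (PySem.Str.upper key))
    match hres with
    | some key => some key
    | none =>
      -- 'for preferred in ("OBS_VALUE", "OBS_VALUE:Observation Value")' unrolled over the literal 2-tuple
      match candidate_keys.find? (fun key => key == "OBS_VALUE") with
      | some key => some key
      | none =>
        match candidate_keys.find? (fun key => key == "OBS_VALUE:Observation Value") with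
        | some key => some key
        | none => candidate_keys.find? (fun key => PySem.Str.isIn "OBS_VALUE" (PySem.Str.upper key))

-- ===== PORT B =====
def altTier (hint : Option String) (key : String) : Option Nat :=
  let ku := PySem.Str.upper key
  if (match hint with | some h => !(h == "") && key == h | none => false) then some 0
  else if (match hint with | some h => !(h == "") && PySem.Str.isIn (PySem.Str.upper h) ku | none => false) then some 1
  else if key == "OBS_VALUE" then some 2
  else if key == "OBS_VALUE:Observation Value" then some 3
  else if PySem.Str.isIn "OBS_VALUE" ku then some 4
  else none

def altStep (hint : Option String) (best : Option (Nat × String)) (key : String) : Option (Nat × String) :=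
  match altTier hint key with
  | none => best
  | some t =>
    match best with
    | none => some (t, key)
    | some (tb, kb) => if t < tb then some (t, key) else some (tb, kb)

def infer_value_column_py_alt (rows : List (List (String × String))) (hint : Option String) : Option String :=
  match rows with
  | [] => none
  | r :: _ =>
    match ((PySem.Dict.ofList r).keys).foldl (altStep hint) none with
    | some (_, key) => some key
    | none => none

-- ===== PRECONDITION & SPEC =====
def Spec_infer_value_column_py (rows : List (List (String × String))) (hint : Option String) (out : Option String) : Prop := out = infer_value_column_py_alt rows hint
instance (rows : List (List (String × String))) (hint : Option String) (out : Option String) : Decidable (Spec_infer_value_column_py rows hint out) := by unfold Spec_infer_value_column_py; infer_instance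

-- ===== CLAIM (what is proved, stated in full; the proofs are below) =====
def Claim_equal_infer_value_column_py : Prop := ∀ (rows : List (List (String × String))) (hint : Option String), Dom_infer_value_column_py rows hint → Spec_infer_value_column_py rows hint (infer_value_column_py rows hint)

-- ===== LEMMAS AND PROOFS =====

-- Proof-side scaffolding: A as a cascade over five predicates, B as a tiered fold.
def oOr (a b : Option String) : Option String :=
  match a with
  | some x => some x
  | none => b

@[simp] theorem oOr_some (x : String) (b : Option String) : oOr (some x) b = some x := rfl
@[simp] theorem oOr_none (b : Option String) : oOr none b = b := rfl
@[simp] theorem getD_oOr (a b : Option String) (d : String) : (oOr a b).getD d = a.getD (b.getD d) := by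
  cases a <;> rfl
@[simp] theorem oOr_some_right (a : Option String) (y : String) : oOr a (some y) = some (a.getD y) := by
  cases a <;> rfl

def casc5 (p0 p1 p2 p3 p4 : String → Bool) (l : List String) : Option String :=
  oOr (l.find? p0) (oOr (l.find? p1) (oOr (l.find? p2) (oOr (l.find? p3) (l.find? p4))))

def tier5 (p0 p1 p2 p3 p4 : String → Bool) (k : String) : Option Nat :=
  if p0 k then some 0 else if p1 k then some 1 else if p2 k then some 2
  else if p3 k then some 3 else if p4 k then some 4 else none

def step5 (p0 p1 p2 p3 p4 : String → Bool) (best : Option (Nat × String)) (key : String) : Option (Nat × String) :=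
  match tier5 p0 p1 p2 p3 p4 key with
  | none => best
  | some t =>
    match best with
    | none => some (t, key)
    | some (tb, kb) => if t < tb then some (t, key) else some (tb, kb)

def below5 (p0 p1 p2 p3 _p4 : String → Bool) (t : Nat) (l : List String) : Option String :=
  match t with
  | 0 => none
  | 1 => l.find? p0
  | 2 => oOr (l.find? p0) (l.find? p1)
  | 3 => oOr (l.find? p0) (oOr (l.find? p1) (l.find? p2))
  | _ => oOr (l.find? p0) (oOr (l.find? p1) (oOr (l.find? p2) (l.find? p3)))

theorem find?_false (l : List String) : l.find? (fun _ => false) = none := by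
  induction l with
  | nil => rfl
  | cons a l ih => simp [List.find?, ih]

theorem fold_some (p0 p1 p2 p3 p4 : String → Bool) (l : List String) :
    ∀ (t : Nat) (k : String), t ≤ 4 →
      (l.foldl (step5 p0 p1 p2 p3 p4) (some (t, k))).map Prod.snd
        = some ((below5 p0 p1 p2 p3 p4 t l).getD k) := by
  induction l with
  | nil =>
    intro t k ht
    interval_cases t <;> simp [below5]
  | cons k' rest ih =>
    intro t k ht
    simp only [List.foldl_cons]
    by_cases h0 : p0 k'
    · have htk : tier5 p0 p1 p2 p3 p4 k' = some 0 := by simp [tier5, h0]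
      by_cases hlt : 0 < t
      · have hstep : step5 p0 p1 p2 p3 p4 (some (t, k)) k' = some (0, k') := by
          simp [step5, htk, hlt]
        rw [hstep, ih 0 k' (by omega)]
        interval_cases t <;> simp [below5, List.find?_cons, h0]
      · have hstep : step5 p0 p1 p2 p3 p4 (some (t, k)) k' = some (t, k) := by
          simp [step5, htk, hlt]
        rw [hstep, ih t k ht]
        interval_cases t <;> simp [below5, List.find?_cons, h0]
    by_cases h1 : p1 k'
    · have htk : tier5 p0 p1 p2 p3 p4 k' = some 1 := by simp [tier5, h0, h1]
      by_cases hlt : 1 < t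
      · have hstep : step5 p0 p1 p2 p3 p4 (some (t, k)) k' = some (1, k') := by
          simp [step5, htk, hlt]
        rw [hstep, ih 1 k' (by omega)]
        interval_cases t <;> simp [below5, List.find?_cons, h0, h1]
      · have hstep : step5 p0 p1 p2 p3 p4 (some (t, k)) k' = some (t, k) := by
          simp [step5, htk, hlt]
        rw [hstep, ih t k ht]
        interval_cases t <;> simp [below5, List.find?_cons, h0, h1]
    by_cases h2 : p2 k'
    · have htk : tier5 p0 p1 p2 p3 p4 k' = some 2 := by simp [tier5, h0, h1, h2]
      by_cases hlt : 2 < t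
      · have hstep : step5 p0 p1 p2 p3 p4 (some (t, k)) k' = some (2, k') := by
          simp [step5, htk, hlt]
        rw [hstep, ih 2 k' (by omega)]
        interval_cases t <;> simp [below5, List.find?_cons, h0, h1, h2]
      · have hstep : step5 p0 p1 p2 p3 p4 (some (t, k)) k' = some (t, k) := by
          simp [step5, htk, hlt]
        rw [hstep, ih t k ht]
        interval_cases t <;> simp [below5, List.find?_cons, h0, h1, h2]
    by_cases h3 : p3 k'
    · have htk : tier5 p0 p1 p2 p3 p4 k' = some 3 := by simp [tier5, h0, h1, h2, h3]
      by_cases hlt : 3 < t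
      · have hstep : step5 p0 p1 p2 p3 p4 (some (t, k)) k' = some (3, k') := by
          simp [step5, htk, hlt]
        rw [hstep, ih 3 k' (by omega)]
        interval_cases t <;> simp [below5, List.find?_cons, h0, h1, h2, h3]
      · have hstep : step5 p0 p1 p2 p3 p4 (some (t, k)) k' = some (t, k) := by
          simp [step5, htk, hlt]
        rw [hstep, ih t k ht]
        interval_cases t <;> simp [below5, List.find?_cons, h0, h1, h2, h3]
    by_cases h4 : p4 k'
    · have htk : tier5 p0 p1 p2 p3 p4 k' = some 4 := by simp [tier5, h0, h1, h2, h3, h4]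
      by_cases hlt : 4 < t
      · have hstep : step5 p0 p1 p2 p3 p4 (some (t, k)) k' = some (4, k') := by
          simp [step5, htk, hlt]
        rw [hstep, ih 4 k' (by omega)]
        interval_cases t <;> simp [below5, List.find?_cons, h0, h1, h2, h3, h4]
      · have hstep : step5 p0 p1 p2 p3 p4 (some (t, k)) k' = some (t, k) := by
          simp [step5, htk, hlt]
        rw [hstep, ih t k ht]
        interval_cases t <;> simp [below5, List.find?_cons, h0, h1, h2, h3, h4]
    have htk : tier5 p0 p1 p2 p3 p4 k' = none := by simp [tier5, h0, h1, h2, h3, h4]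
    have hstep : step5 p0 p1 p2 p3 p4 (some (t, k)) k' = some (t, k) := by
      simp [step5, htk]
    rw [hstep, ih t k ht]
    interval_cases t <;> simp [below5, List.find?_cons, h0, h1, h2, h3]

theorem fold_none (p0 p1 p2 p3 p4 : String → Bool) (l : List String) :
    (l.foldl (step5 p0 p1 p2 p3 p4) none).map Prod.snd = casc5 p0 p1 p2 p3 p4 l := by
  induction l with
  | nil => simp [casc5]
  | cons k' rest ih =>
    simp only [List.foldl_cons]
    by_cases h0 : p0 k'
    · have htk : tier5 p0 p1 p2 p3 p4 k' = some 0 := by simp [tier5, h0]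
      have hstep : step5 p0 p1 p2 p3 p4 none k' = some (0, k') := by
        simp [step5, htk]
      rw [hstep, fold_some p0 p1 p2 p3 p4 rest 0 k' (by omega)]
      simp [casc5, below5, List.find?_cons, h0]
    by_cases h1 : p1 k'
    · have htk : tier5 p0 p1 p2 p3 p4 k' = some 1 := by simp [tier5, h0, h1]
      have hstep : step5 p0 p1 p2 p3 p4 none k' = some (1, k') := by
        simp [step5, htk]
      rw [hstep, fold_some p0 p1 p2 p3 p4 rest 1 k' (by omega)]
      simp [casc5, below5, List.find?_cons, h0, h1]
    by_cases h2 : p2 k'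
    · have htk : tier5 p0 p1 p2 p3 p4 k' = some 2 := by simp [tier5, h0, h1, h2]
      have hstep : step5 p0 p1 p2 p3 p4 none k' = some (2, k') := by
        simp [step5, htk]
      rw [hstep, fold_some p0 p1 p2 p3 p4 rest 2 k' (by omega)]
      simp [casc5, below5, List.find?_cons, h0, h1, h2]
    by_cases h3 : p3 k'
    · have htk : tier5 p0 p1 p2 p3 p4 k' = some 3 := by simp [tier5, h0, h1, h2, h3]
      have hstep : step5 p0 p1 p2 p3 p4 none k' = some (3, k') := by
        simp [step5, htk]
      rw [hstep, fold_some p0 p1 p2 p3 p4 rest 3 k' (by omega)]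
      simp [casc5, below5, List.find?_cons, h0, h1, h2, h3]
    by_cases h4 : p4 k'
    · have htk : tier5 p0 p1 p2 p3 p4 k' = some 4 := by simp [tier5, h0, h1, h2, h3, h4]
      have hstep : step5 p0 p1 p2 p3 p4 none k' = some (4, k') := by
        simp [step5, htk]
      rw [hstep, fold_some p0 p1 p2 p3 p4 rest 4 k' (by omega)]
      simp [casc5, below5, List.find?_cons, h0, h1, h2, h3, h4]
    have htk : tier5 p0 p1 p2 p3 p4 k' = none := by simp [tier5, h0, h1, h2, h3, h4]
    have hstep : step5 p0 p1 p2 p3 p4 none k' = none := by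
      simp [step5, htk]
    rw [hstep, ih]
    simp [casc5, List.find?_cons, h0, h1, h2, h3, h4]

theorem match_eq_map (o : Option (Nat × String)) :
    (match o with | some (_, key) => some key | none => none) = o.map Prod.snd := by
  rcases o with _ | ⟨t, k⟩ <;> rfl

theorem altStep_eq (hint : Option String) (p0 p1 : String → Bool)
    (h : altTier hint = tier5 p0 p1 (fun key => key == "OBS_VALUE")
          (fun key => key == "OBS_VALUE:Observation Value")
          (fun key => PySem.Str.isIn "OBS_VALUE" (PySem.Str.upper key))) :
    altStep hint = step5 p0 p1 (fun key => key == "OBS_VALUE")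
          (fun key => key == "OBS_VALUE:Observation Value")
          (fun key => PySem.Str.isIn "OBS_VALUE" (PySem.Str.upper key)) := by
  funext best key
  simp only [altStep, step5, h]

-- ===== VERDICT (by name: the statement is the Claim_ definition above) =====
theorem infer_value_column_py_spec : Claim_equal_infer_value_column_py := by
  intro rows hint _
  unfold Spec_infer_value_column_py
  match rows with
  | [] => rfl
  | r :: rest =>
    simp only [infer_value_column_py, infer_value_column_py_alt]
    set l := (PySem.Dict.ofList r).keys with hl
    rw [match_eq_map]
    match hint with
    | none =>
      rw [altStep_eq none (fun _ => false) (fun _ => false) (by funext key; simp [altTier, tier5])]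
      rw [fold_none]
      simp only [casc5, find?_false, oOr_none]
      rcases l.find? (fun key => key == "OBS_VALUE") with _ | k <;>
        rcases hf : l.find? (fun key => key == "OBS_VALUE:Observation Value") with _ | k' <;>
        simp [oOr, hf]
    | some h =>
      by_cases hne : h == ""
      · rw [altStep_eq (some h) (fun _ => false) (fun _ => false)
            (by funext key; simp [altTier, tier5, hne])]
        rw [fold_none]
        simp only [hne, if_true, casc5, find?_false, oOr_none]
        rcases l.find? (fun key => key == "OBS_VALUE") with _ | k <;>
          rcases hf : l.find? (fun key => key == "OBS_VALUE:Observation Value") with _ | k' <;>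
          simp [oOr, hf]
      · rw [altStep_eq (some h) (fun key => key == h)
            (fun key => PySem.Str.isIn (PySem.Str.upper h) (PySem.Str.upper key))
            (by funext key; simp [altTier, tier5, hne])]
        rw [fold_none]
        simp only [hne, if_false, casc5]
        rcases l.find? (fun key => key == h) with _ | k <;>
          rcases hf1 : l.find? (fun key => PySem.Str.isIn (PySem.Str.upper h) (PySem.Str.upper key)) with _ | k1 <;>
          rcases hf2 : l.find? (fun key => key == "OBS_VALUE") with _ | k2 <;>
          rcases hf3 : l.find? (fun key => key == "OBS_VALUE:Observation Value") with _ | k3 <;>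
          simp [oOr, hf1, hf2, hf3]
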